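-- pv_equiv track=rewrite | github.com/DaviCMachado/T1_comunicacao | encode.py | mlt3
-- ===== SOURCE A (Python) =====
-- def mlt3(bits):
--     nivel = 0
--     t = 1
--     tempo, sinal = [], []
--     ultimoNivelNaoNulo = 1 #primeiro '1' faz tensão ir p baixo
--     for bit in bits:
--         if bit == '1':
--             if len(sinal)==0 or sinal[-1] == 0:
--                 ultimoNivelNaoNulo *=-1
--                 nivel = ultimoNivelNaoNulo
--             elif sinal[-1] == 1 or sinal[-1] == -1:
--                 nivel = 0
--
--         elif bit == '0': #faz nada, mantém valores.
--             pass
--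
--         tempo += [t, t+1]
--         sinal += [nivel]*2
--
--         t += 1
--
--     return tempo, sinal
-- ===== SOURCE B (Python) =====
-- def mlt3(bits):
--     tempo, sinal = [], []
--     count = 0
--     for t, bit in enumerate(bits, 1):
--         if bit == '1':
--             count += 1
--         nivel = (0, -1, 0, 1)[count % 4]
--         tempo += [t, t + 1]
--         sinal += [nivel, nivel]
--     return tempo, sinal
-- ===== Notes on version B (the rewrite author's own statement) =====
-- stated objective: simpler
-- what changed: Replaces A's look-back at sinal[-1] and the flipping ultimoNivelNaoNulo state with a single ones-counter and a closed-form modular lookup (0,-1,0,1)[count%4].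
import Mathlib
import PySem

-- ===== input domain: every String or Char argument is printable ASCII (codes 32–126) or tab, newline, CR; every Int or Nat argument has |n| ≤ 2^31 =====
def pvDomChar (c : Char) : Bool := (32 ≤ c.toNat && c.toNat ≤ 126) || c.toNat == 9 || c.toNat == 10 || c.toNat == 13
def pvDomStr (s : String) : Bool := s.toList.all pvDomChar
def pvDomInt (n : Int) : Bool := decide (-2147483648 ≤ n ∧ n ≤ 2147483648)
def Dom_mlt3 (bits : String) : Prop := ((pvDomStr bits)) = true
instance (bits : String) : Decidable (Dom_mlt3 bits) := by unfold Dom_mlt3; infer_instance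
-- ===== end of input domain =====

-- B replaces A's look-back at sinal[-1] and the flipping ultimoNivelNaoNulo with a
-- ones-counter and a closed-form lookup (0,-1,0,1)[count%4]; objective: simpler.

-- ===== PORT A =====
-- state: (nivel, t, tempo, sinal, ultimoNivelNaoNulo)
def mlt3Step (s : Int × Int × List Int × List Int × Int) (bit : Char) :
    Int × Int × List Int × List Int × Int :=
  let (nivel, t, tempo, sinal, ultimo) := s
  let (nivel, ultimo) :=
    if bit == '1' then
      if sinal.isEmpty || (sinal.getLast? == some (0 : Int)) then
        (-ultimo, -ultimo)
      else if (sinal.getLast? == some (1 : Int)) || (sinal.getLast? == some (-1 : Int)) then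
        ((0 : Int), ultimo)
      else (nivel, ultimo)
    else (nivel, ultimo)
  (nivel, t + 1, tempo ++ [t, t + 1], sinal ++ [nivel, nivel], ultimo)

def mlt3 (bits : String) : List Int × List Int :=
  let s := bits.toList.foldl mlt3Step (0, 1, [], [], 1)
  (s.2.2.1, s.2.2.2.1)

-- ===== PORT B =====
-- state: (count, t, tempo, sinal)
def mlt3AltStep (s : Nat × Int × List Int × List Int) (bit : Char) :
    Nat × Int × List Int × List Int :=
  let (count, t, tempo, sinal) := s
  let count := if bit == '1' then count + 1 else count
  let nivel := [(0 : Int), -1, 0, 1].getD (count % 4) 0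
  (count, t + 1, tempo ++ [t, t + 1], sinal ++ [nivel, nivel])

def mlt3_alt (bits : String) : List Int × List Int :=
  let s := bits.toList.foldl mlt3AltStep (0, 1, [], [])
  (s.2.2.1, s.2.2.2)

-- ===== PRECONDITION & SPEC =====
def Spec_mlt3 (bits : String) (out : List Int × List Int) : Prop := out = mlt3_alt bits
instance (bits : String) (out : List Int × List Int) : Decidable (Spec_mlt3 bits out) := by unfold Spec_mlt3; infer_instance

-- ===== CLAIM (what is proved, stated in full; the proofs are below) =====
def Claim_equal_mlt3 : Prop := ∀ (bits : String), Dom_mlt3 bits → Spec_mlt3 bits (mlt3 bits)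

-- ===== LEMMAS AND PROOFS =====

-- the level and the last-nonzero-level as functions of the ones-count
def pvLev (c : Nat) : Int := [(0 : Int), -1, 0, 1].getD (c % 4) 0
def pvUlt (c : Nat) : Int := if c % 4 = 1 ∨ c % 4 = 2 then -1 else 1

lemma mlt3_key (l : List Char) : ∀ (c : Nat) (t : Int) (te si : List Int),
    si.getLast?.getD 0 = pvLev c →
    (let s := l.foldl mlt3Step (pvLev c, t, te, si, pvUlt c); (s.2.2.1, s.2.2.2.1))
      = (let s := l.foldl mlt3AltStep (c, t, te, si); (s.2.2.1, s.2.2.2)) := by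
  induction l with
  | nil => intro c t te si h; simp
  | cons b l ih =>
    intro c t te si h
    have h4 : c % 4 = 0 ∨ c % 4 = 1 ∨ c % 4 = 2 ∨ c % 4 = 3 := by omega
    by_cases hb : b = '1'
    · -- the step of A produces (pvLev (c+1), …, pvUlt (c+1)); B increments the count
      subst hb
      by_cases hsi : si = []
      · subst hsi
        have h0 : (0 : Int) = pvLev c := by simpa using h
        have hc : c % 4 = 0 ∨ c % 4 = 2 := by
          rcases h4 with h4 | h4 | h4 | h4 <;> simp [pvLev, h4] at h0 <;> omega
        rcases hc with h4 | h4 <;>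
        · have h4' : (c + 1) % 4 = (c % 4 + 1) % 4 := by omega
          simp only [List.foldl_cons]
          rw [show (mlt3Step (pvLev c, t, te, [], pvUlt c) '1')
                = (pvLev (c+1), t+1, te ++ [t, t+1],
                   [] ++ [pvLev (c+1), pvLev (c+1)], pvUlt (c+1)) by
                simp [mlt3Step, pvLev, pvUlt, h4, h4']]
          rw [show (mlt3AltStep (c, t, te, []) '1')
                = (c+1, t+1, te ++ [t, t+1], [] ++ [pvLev (c+1), pvLev (c+1)]) by
                simp [mlt3AltStep, pvLev]]
          exact ih (c+1) (t+1) _ _ (by simp [pvLev])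
      · have hlast : si.getLast? = some (pvLev c) := by
          cases hg : si.getLast? with
          | none => exact absurd (List.getLast?_eq_none_iff.mp hg) hsi
          | some x => simpa [hg] using congrArg some h
        rcases h4 with h4 | h4 | h4 | h4 <;>
        · simp only [List.foldl_cons]
          rw [show (mlt3Step (pvLev c, t, te, si, pvUlt c) '1')
                = (pvLev (c+1), t+1, te ++ [t, t+1],
                   si ++ [pvLev (c+1), pvLev (c+1)], pvUlt (c+1)) by
                simp [mlt3Step, hlast, List.isEmpty_iff, hsi, pvLev, pvUlt, h4,
                      show (c + 1) % 4 = (c % 4 + 1) % 4 by omega]]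
          rw [show (mlt3AltStep (c, t, te, si) '1')
                = (c+1, t+1, te ++ [t, t+1], si ++ [pvLev (c+1), pvLev (c+1)]) by
                simp [mlt3AltStep, pvLev]]
          exact ih (c+1) (t+1) _ _ (by simp [List.getLast?_append, pvLev])
    · -- any other character keeps every piece of state (except t/tempo/sinal growth)
      simp only [List.foldl_cons]
      rw [show (mlt3Step (pvLev c, t, te, si, pvUlt c) b)
            = (pvLev c, t+1, te ++ [t, t+1], si ++ [pvLev c, pvLev c], pvUlt c) by
            simp [mlt3Step, hb]]
      rw [show (mlt3AltStep (c, t, te, si) b)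
            = (c, t+1, te ++ [t, t+1], si ++ [pvLev c, pvLev c]) by
            simp [mlt3AltStep, hb, pvLev]]
      exact ih c (t+1) _ _ (by simp [List.getLast?_append])

-- ===== VERDICT (by name: the statement is the Claim_ definition above) =====
theorem mlt3_spec : Claim_equal_mlt3 := by
  intro bits _
  show mlt3 bits = mlt3_alt bits
  have h := mlt3_key bits.toList 0 1 [] [] (by simp [pvLev])
  simpa [mlt3, mlt3_alt, pvLev, pvUlt] using h
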